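-- pv_equiv track=rewrite | github.com/guilhermebaos/Aulas-Uni | Programação I/Exames-ano-passado/Exame-normal/001-Processamento-numero.py | altern
-- ===== SOURCE A (Python) =====
-- def altern(x):
--     str_x = str(x)
--     len_x = len(str_x)
--
--     # Separate even and odd indexed characters
--     even = [int(str_x[index]) for index in range(0, len_x, 2)]
--     odd = [int(str_x[index]) for index in range(1, len_x, 2)]
--
--     # Check all even characters are getting bigger
--     for index, item in enumerate(even[:-1]):
--
--         # Otherwise immediately return False
--         if item > even[index + 1]:
--             return False
--
--     # Check all odd characters are getting smaller
--     for index, item in enumerate(odd[:-1]):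
--
--         # Otherwise immediately return False
--         if item < odd[index + 1]:
--             return False
--
--     return True
-- ===== SOURCE B (Python) =====
-- def altern(x):
--     digits = [int(c) for c in str(x)]
--
--     def go(ds, up):
--         if len(ds) < 3:
--             return True
--         if up:
--             if ds[0] > ds[2]:
--                 return False
--         else:
--             if ds[0] < ds[2]:
--                 return False
--         return go(ds[1:], not up)
--
--     return go(digits, True)
-- ===== Notes on version B (the rewrite author's own statement) =====
-- stated objective: alternative
-- what changed: One digit list and a single stride-2 recursive pass with a toggling direction flag, instead of A's two separately-built even/odd index lists each checked by its own loop.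
import Mathlib
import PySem

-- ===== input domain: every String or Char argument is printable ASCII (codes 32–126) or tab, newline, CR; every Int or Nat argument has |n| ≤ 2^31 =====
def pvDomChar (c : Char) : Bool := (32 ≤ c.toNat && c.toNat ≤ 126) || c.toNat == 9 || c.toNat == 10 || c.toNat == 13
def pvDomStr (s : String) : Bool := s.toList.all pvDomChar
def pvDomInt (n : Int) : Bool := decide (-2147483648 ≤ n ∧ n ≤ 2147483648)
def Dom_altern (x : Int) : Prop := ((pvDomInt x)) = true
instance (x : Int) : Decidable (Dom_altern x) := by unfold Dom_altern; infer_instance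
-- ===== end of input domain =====

-- B replaces A's two even/odd index lists and two loops by one digit list and
-- a single stride-2 recursive pass with a toggling direction flag (objective: alternative).

-- ===== PORT A =====
-- int(c) for a digit character c (Pre_ guarantees every character is a digit)
def pvDigit (c : Char) : Int := (c.toNat : Int) - 48

-- characters at indices 0,2,4,… — the values of [str_x[i] for i in range(0, len, 2)]
def pvEvens {α : Type} : List α → List α
  | [] => []
  | [a] => [a]
  | a :: _ :: t => a :: pvEvens t

-- 'for index, item in enumerate(even[:-1]): if item > even[index+1]: return False'
def pvChkND : List Int → Bool
  | a :: b :: t => if a > b then false else pvChkND (b :: t)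
  | _ => true

-- 'for index, item in enumerate(odd[:-1]): if item < odd[index+1]: return False'
def pvChkNI : List Int → Bool
  | a :: b :: t => if a < b then false else pvChkNI (b :: t)
  | _ => true

def altern (x : Int) : Bool :=
  let str_x := (PySem.Int.toStr x).toList
  let even := (pvEvens str_x).map pvDigit
  let odd := (pvEvens str_x.tail).map pvDigit
  pvChkND even && pvChkNI odd

-- ===== PORT B =====
-- 'go(ds, up)' from Source B: one pass comparing ds[0] with ds[2], flag toggles
def pvGo : List Int → Bool → Bool
  | a :: b :: c :: t, true => if a > c then false else pvGo (b :: c :: t) false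
  | a :: b :: c :: t, false => if a < c then false else pvGo (b :: c :: t) true
  | _, _ => true

def altern_alt (x : Int) : Bool :=
  pvGo ((PySem.Int.toStr x).toList.map pvDigit) true

-- ===== PRECONDITION & SPEC =====
-- Pre_: x is non-negative; on a negative x, str(x) starts with a minus sign and int of that
-- character raises ValueError in both A and B. (The port equivalence itself holds for all x,
-- so the proof does not need the hypothesis; Pre_ records where the Python programs return.)
def Pre_altern (x : Int) : Prop := 0 ≤ x
instance (x : Int) : Decidable (Pre_altern x) := by unfold Pre_altern; infer_instance
def pvWitness_altern : Int := 132

def Spec_altern (x : Int) (out : Bool) : Prop := out = altern_alt x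
instance (x : Int) (out : Bool) : Decidable (Spec_altern x out) := by unfold Spec_altern; infer_instance

-- ===== CLAIM (what is proved, stated in full; the proofs are below) =====
def Claim_equal_altern : Prop := ∀ (x : Int), Dom_altern x → Pre_altern x → Spec_altern x (altern x)

-- ===== LEMMAS AND PROOFS =====
theorem pvEvens_cons {α : Type} (c : α) (t : List α) :
    pvEvens (c :: t) = c :: pvEvens t.tail := by
  cases t <;> simp [pvEvens]

theorem pvEvens_map {α β : Type} (f : α → β) (l : List α) :
    pvEvens (l.map f) = (pvEvens l).map f := by
  induction l using pvEvens.induct <;> simp_all [pvEvens]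

theorem pv_tail_map {α β : Type} (f : α → β) (l : List α) :
    (l.map f).tail = l.tail.map f := by
  cases l <;> simp

theorem pvGo_eq (l : List Int) : ∀ up : Bool,
    pvGo l up = if up then pvChkND (pvEvens l) && pvChkNI (pvEvens l.tail)
                else pvChkNI (pvEvens l) && pvChkND (pvEvens l.tail) := by
  induction l with
  | nil => intro up; cases up <;> simp [pvGo, pvEvens, pvChkND, pvChkNI]
  | cons a rest ih =>
    intro up
    match rest with
    | [] => cases up <;> simp [pvGo, pvEvens, pvChkND, pvChkNI]
    | [b] => cases up <;> simp [pvGo, pvEvens, pvChkND, pvChkNI]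
    | b :: c :: t =>
      have h := ih (!up)
      cases up <;>
        simp only [pvGo, h, Bool.not_true, pvEvens_cons, List.tail_cons,
          pvChkND, pvChkNI] <;>
        split_ifs <;> simp_all [pvEvens_cons, Bool.and_comm]

-- ===== VERDICT (by name: the statement is the Claim_ definition above) =====
theorem altern_spec : Claim_equal_altern := by
  intro x _ _
  unfold Spec_altern altern altern_alt
  rw [pvGo_eq, if_pos rfl, pv_tail_map]
  simp only [pvEvens_map]
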